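-- pv_equiv track=rewrite | github.com/AleFEMac/PDDLParser | old_code/untitled2.py | foo
-- ===== SOURCE A (Python) =====
-- def foo(cc):
--
--     if cc == []:
--         return []
--
--     if len(cc) == 1:
--         allperms = []
--         for i in cc[0][1]:
--             allperms.append([(cc[0][0],i)])
--         return allperms
--
--
--     head = cc[0]
--     body = cc[1:]
--
--
--     allperms = []
--
--     for e in head[1]:
--         ret = foo(body)
--         for r in ret:
--             allperms.append([(head[0],e)]+r)
--
--
--     return allperms
-- ===== SOURCE B (Python) =====
-- def foo(cc):
--     if not cc:
--         return []
--     acc = [[]]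
--     for key, dom in reversed(cc):
--         acc = [[(key, v)] + r for v in dom for r in acc]
--     return acc
-- ===== Notes on version B (the rewrite author's own statement) =====
-- stated objective: alternative
-- what changed: Replaced the recursion that re-runs foo(body) once per element of the head's domain with a single iterative back-to-front fold that builds each level's product exactly once; both remain bounded by the (exponential) output size, so no measured speed-up is claimed.
import Mathlib
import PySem

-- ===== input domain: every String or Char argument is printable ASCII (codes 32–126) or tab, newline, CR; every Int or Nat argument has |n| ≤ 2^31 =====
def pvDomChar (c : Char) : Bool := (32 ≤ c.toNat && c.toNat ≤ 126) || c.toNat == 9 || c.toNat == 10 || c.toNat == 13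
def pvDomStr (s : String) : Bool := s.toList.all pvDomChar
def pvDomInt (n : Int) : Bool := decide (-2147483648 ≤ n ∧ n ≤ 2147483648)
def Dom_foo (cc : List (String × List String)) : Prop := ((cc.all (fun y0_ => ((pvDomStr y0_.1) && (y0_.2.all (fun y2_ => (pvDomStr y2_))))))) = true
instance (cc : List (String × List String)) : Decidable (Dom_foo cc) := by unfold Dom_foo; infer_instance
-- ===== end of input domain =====

-- B replaces A's per-element recursive recomputation of the suffix product by ONE
-- iterative back-to-front fold (alternative structure; each level's product built once).

-- ===== PORT A =====
-- literal transliteration of A's recursion: [] case, singleton case with an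
-- append-accumulating loop, and the general case with the nested loops where
-- 'ret = foo body' is recomputed inside the outer loop, exactly as in Python.
def foo : List (String × List String) → List (List (String × String))
  | [] => []
  | [p] => p.2.foldl (fun allperms i => allperms ++ [[(p.1, i)]]) []
  | p :: q :: body =>
      p.2.foldl
        (fun allperms e =>
          (foo (q :: body)).foldl (fun allperms r => allperms ++ [[(p.1, e)] ++ r]) allperms)
        []

-- ===== PORT B =====
-- Source B: early [] return, then fold over reversed cc; the comprehension
-- [[(key,v)]+r for v in dom for r in acc] is flatMap over dom of map over acc.
def foo_alt (cc : List (String × List String)) : List (List (String × String)) :=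
  if cc = [] then []
  else
    cc.reverse.foldl
      (fun acc p => p.2.flatMap (fun v => acc.map (fun r => [(p.1, v)] ++ r)))
      [[]]

-- ===== PRECONDITION & SPEC =====
def Spec_foo (cc : List (String × List String)) (out : List (List (String × String))) : Prop := out = foo_alt cc
instance (cc : List (String × List String)) (out : List (List (String × String))) : Decidable (Spec_foo cc out) := by unfold Spec_foo; infer_instance

-- ===== CLAIM (what is proved, stated in full; the proofs are below) =====
def Claim_equal_foo : Prop := ∀ (cc : List (String × List String)), Dom_foo cc → Spec_foo cc (foo cc)

-- ===== LEMMAS AND PROOFS =====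

-- one product step (what B's fold body does at one level)
def pvStep (p : String × List String) (acc : List (List (String × String))) :
    List (List (String × String)) :=
  p.2.flatMap (fun v => acc.map (fun r => [(p.1, v)] ++ r))

theorem pv_foldl_append {α β : Type} (f : α → List β) (l : List α) (init : List β) :
    l.foldl (fun acc x => acc ++ f x) init = init ++ l.flatMap f := by
  induction l generalizing init with
  | nil => simp
  | cons x xs ih => simp [List.foldl_cons, ih, List.append_assoc]

theorem pv_inner_foldl (ret acc : List (List (String × String)))
    (g : List (String × String) → List (String × String)) :
    ret.foldl (fun a r => a ++ [g r]) acc = acc ++ ret.map g := by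
  induction ret generalizing acc with
  | nil => simp
  | cons r rs ih => simp [List.foldl_cons, ih]

theorem foo_eq_foldr : ∀ (cc : List (String × List String)), cc ≠ [] →
    foo cc = cc.foldr pvStep [[]] := by
  intro cc h
  induction cc with
  | nil => exact absurd rfl h
  | cons p rest ih =>
    cases rest with
    | nil =>
      show foo [p] = _
      rw [foo]
      rw [pv_foldl_append (fun i => [[(p.1, i)]])]
      simp [pvStep]
    | cons q body =>
      show foo (p :: q :: body) = _
      rw [foo]
      have hrec := ih (by simp)
      have : ∀ (init : List (List (String × String))),
          p.2.foldl
            (fun allperms e =>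
              (foo (q :: body)).foldl (fun a r => a ++ [[(p.1, e)] ++ r]) allperms)
            init
          = init ++ p.2.flatMap (fun e => (foo (q :: body)).map (fun r => [(p.1, e)] ++ r)) := by
        intro init
        rw [show (fun allperms e =>
              (foo (q :: body)).foldl (fun a r => a ++ [[(p.1, e)] ++ r]) allperms)
            = (fun allperms e => allperms ++
                (foo (q :: body)).map (fun r => [(p.1, e)] ++ r)) from ?_]
        · exact pv_foldl_append _ _ _
        · funext a e; exact pv_inner_foldl _ _ _
      rw [this, List.nil_append, hrec]
      rfl

-- ===== VERDICT (by name: the statement is the Claim_ definition above) =====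
theorem foo_spec : Claim_equal_foo := by
  intro cc _
  show foo cc = foo_alt cc
  unfold foo_alt
  cases cc with
  | nil => simp [foo]
  | cons p rest =>
    rw [if_neg (by simp)]
    rw [List.foldl_reverse, foo_eq_foldr _ (by simp)]
    rfl
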